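-- pv_equiv track=rewrite | github.com/HAHAHAHA123456/MyUtils | LeTou_StaticFunc.py | static_odd_big_zhiNumber
-- ===== SOURCE A (Python) =====
-- zhiNumberList = [1, 2, 3, 5, 7, 11, 13, 17, 19, 23, 29, 31]
--
-- bigNumSeperate = 18
--
-- def static_odd_big_zhiNumber(list):
--     oddNumber = 0
--     bigNumber = 0
--     zhiNumber = 0
--     for li in list:
--         if li % 2 == 1:
--             oddNumber += 1
--         if li >= bigNumSeperate:
--             bigNumber += 1
--         if li in zhiNumberList:
--             zhiNumber += 1
--     return oddNumber, bigNumber, zhiNumber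
-- ===== SOURCE B (Python) =====
-- # B: divide-and-conquer — split the list in halves recursively and add the count triples,
-- # instead of A's single linear loop carrying three counters.
-- zhiNumberList = [1, 2, 3, 5, 7, 11, 13, 17, 19, 23, 29, 31]
--
-- bigNumSeperate = 18
--
-- def static_odd_big_zhiNumber(list):
--     n = len(list)
--     if n == 0:
--         return 0, 0, 0
--     if n == 1:
--         x = list[0]
--         return ((1 if x % 2 == 1 else 0),
--                 (1 if x >= bigNumSeperate else 0),
--                 (1 if x in zhiNumberList else 0))
--     mid = n // 2
--     a = static_odd_big_zhiNumber(list[:mid])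
--     b = static_odd_big_zhiNumber(list[mid:])
--     return a[0] + b[0], a[1] + b[1], a[2] + b[2]
-- ===== Notes on version B (the rewrite author's own statement) =====
-- stated objective: alternative
-- what changed: Replaced the single linear loop maintaining three counters with a divide-and-conquer recursion that splits the list in halves and combines the three-count triples by componentwise addition.
import Mathlib
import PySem

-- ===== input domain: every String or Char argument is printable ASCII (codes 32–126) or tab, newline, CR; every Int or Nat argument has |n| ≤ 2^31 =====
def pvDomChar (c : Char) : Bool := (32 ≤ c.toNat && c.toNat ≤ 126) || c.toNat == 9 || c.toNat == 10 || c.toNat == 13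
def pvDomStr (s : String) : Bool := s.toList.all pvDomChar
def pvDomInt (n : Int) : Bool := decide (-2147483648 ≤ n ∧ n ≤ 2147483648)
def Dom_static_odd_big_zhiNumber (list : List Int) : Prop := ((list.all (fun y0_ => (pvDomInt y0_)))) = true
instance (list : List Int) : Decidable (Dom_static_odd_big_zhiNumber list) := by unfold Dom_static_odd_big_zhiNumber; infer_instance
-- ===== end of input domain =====

-- B replaces A's single three-counter loop with a divide-and-conquer recursion on halves (alternative decomposition; same cost).

-- ===== PORT A =====
def zhiNumberList : List Int := [1, 2, 3, 5, 7, 11, 13, 17, 19, 23, 29, 31]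

def bigNumSeperate : Int := 18

def static_odd_big_zhiNumber (list : List Int) : Int × Int × Int :=
  let s := list.foldl (fun (s : Int × Int × Int) li =>
      let s := if PySem.Int.mod li 2 = 1 then (s.1 + 1, s.2.1, s.2.2) else s
      let s := if li ≥ bigNumSeperate then (s.1, s.2.1 + 1, s.2.2) else s
      if li ∈ zhiNumberList then (s.1, s.2.1, s.2.2 + 1) else s)
    (0, 0, 0)
  s

-- ===== PORT B =====
-- divide and conquer: list[:mid] / list[mid:] become List.take / List.drop (exact for 0 ≤ mid ≤ n);
-- list[0] under the 'n == 1' guard is the head of the singleton list.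
def static_odd_big_zhiNumber_alt (list : List Int) : Int × Int × Int :=
  if list.length = 0 then (0, 0, 0)
  else if list.length = 1 then
    let x := list.headI
    ((if PySem.Int.mod x 2 = 1 then 1 else 0),
     (if x ≥ bigNumSeperate then 1 else 0),
     (if x ∈ zhiNumberList then 1 else 0))
  else
    let mid := list.length / 2
    let a := static_odd_big_zhiNumber_alt (list.take mid)
    let b := static_odd_big_zhiNumber_alt (list.drop mid)
    (a.1 + b.1, a.2.1 + b.2.1, a.2.2 + b.2.2)
termination_by list.length
decreasing_by
  · simp; omega
  · simp; omega

-- ===== PRECONDITION & SPEC =====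
def Spec_static_odd_big_zhiNumber (list : List Int) (out : Int × Int × Int) : Prop := out = static_odd_big_zhiNumber_alt list
instance (list : List Int) (out : Int × Int × Int) : Decidable (Spec_static_odd_big_zhiNumber list out) := by unfold Spec_static_odd_big_zhiNumber; infer_instance

-- ===== CLAIM =====
def Claim_equal_static_odd_big_zhiNumber : Prop := ∀ (list : List Int), Dom_static_odd_big_zhiNumber list → Spec_static_odd_big_zhiNumber list (static_odd_big_zhiNumber list)

-- ===== LEMMAS AND PROOFS =====
theorem static_loop_eq (l : List Int) (a b c : Int) :
    l.foldl (fun (s : Int × Int × Int) li =>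
      let s := if PySem.Int.mod li 2 = 1 then (s.1 + 1, s.2.1, s.2.2) else s
      let s := if li ≥ bigNumSeperate then (s.1, s.2.1 + 1, s.2.2) else s
      if li ∈ zhiNumberList then (s.1, s.2.1, s.2.2 + 1) else s) (a, b, c)
    = (a + (l.countP (fun x => PySem.Int.mod x 2 == 1) : Int),
       b + (l.countP (fun x => x ≥ bigNumSeperate) : Int),
       c + (l.countP (fun x => x ∈ zhiNumberList) : Int)) := by
  induction l generalizing a b c with
  | nil => simp
  | cons h t ih =>
    simp only [List.foldl_cons, List.countP_cons]
    rw [ih]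
    have hm : PySem.Int.mod h 2 = h % 2 := PySem.Int.mod_eq_emod_of_pos (by norm_num)
    by_cases h1 : h % 2 = 1 <;> by_cases h2 : h ≥ bigNumSeperate <;>
      by_cases h3 : h ∈ zhiNumberList <;>
      simp [hm, h1, h2, h3] <;> (try push_cast) <;> (try ring)
    all_goals first | trivial | exact ⟨trivial, trivial⟩ | exact ⟨trivial, trivial, trivial⟩

theorem alt_eq_countP (l : List Int) :
    static_odd_big_zhiNumber_alt l
    = ((l.countP (fun x => PySem.Int.mod x 2 == 1) : Int),
       (l.countP (fun x => x ≥ bigNumSeperate) : Int),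
       (l.countP (fun x => x ∈ zhiNumberList) : Int)) := by
  induction l using static_odd_big_zhiNumber_alt.induct with
  | case1 l h0 =>
    rw [static_odd_big_zhiNumber_alt]
    have : l = [] := List.length_eq_zero_iff.mp h0
    simp [this]
  | case2 l h0 h1 =>
    rw [static_odd_big_zhiNumber_alt]
    obtain ⟨x, hx⟩ := List.length_eq_one_iff.mp h1
    subst hx
    simp [List.countP_cons]
  | case3 l h0 h1 mid iha ihb =>
    rw [static_odd_big_zhiNumber_alt]
    simp only [h0, h1, if_false]
    rw [iha, ihb]
    have h : ∀ p : Int → Bool,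
        ((l.take mid).countP p : Int) + ((l.drop mid).countP p : Int) = (l.countP p : Int) := by
      intro p
      rw [← Nat.cast_add, ← List.countP_append, List.take_append_drop]
    simp only [Prod.mk.injEq]
    exact ⟨h _, h _, h _⟩

-- ===== VERDICT =====
theorem static_odd_big_zhiNumber_spec : Claim_equal_static_odd_big_zhiNumber := by
  intro list _
  unfold Spec_static_odd_big_zhiNumber static_odd_big_zhiNumber
  rw [static_loop_eq, alt_eq_countP]
  simp
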